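-- pv_equiv track=rewrite | github.com/hcl67/Euler | euler51.py | checkpb
-- ===== SOURCE A (Python) =====
-- from math import sqrt
--
-- def isPrime(x): ##check if x is prime
--     if x<1:
--         return False
--     if x%2==0 and x!=2:
--         return False
--     else:
--         for i in range(3,int(sqrt(x))+1,2):
--             if x%i==0 and x!=i:
--                 return False
--         return True
--
-- def checkpb(p,b):
--     pcount=0  ##record maximum number of prime value family
--     for i in range(10):
--         t=''  ##possible prime value
--         if b[0]=='1' and i==0: continue ##skip the first digit 0
--         for j in range(len(b)):
--             if b[j]=='1':
--                 t+=str(i)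
--             else:
--                 t+=p[j]
--         if isPrime(int(t)):
--             pcount+=1
--     return pcount
-- ===== SOURCE B (Python) =====
-- from math import sqrt
--
-- def isPrime(x): ##check if x is prime
--     if x<1:
--         return False
--     if x%2==0 and x!=2:
--         return False
--     else:
--         for i in range(3,int(sqrt(x))+1,2):
--             if x%i==0 and x!=i:
--                 return False
--         return True
--
-- def checkpb(p, b):
--     # One arithmetic pre-pass: base = value contributed by p's digits,
--     # mult = sum of place values of the '1' positions; then each candidate
--     # is base + i*mult -- no string assembly, no int() parsing per candidate.
--     L = len(b)
--     base = 0
--     mult = 0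
--     for j in range(L):
--         w = 10 ** (L - 1 - j)
--         if b[j] == '1':
--             mult += w
--         else:
--             base += int(p[j]) * w
--     count = 0
--     for i in range(10):
--         if b[0] == '1' and i == 0:
--             continue
--         if isPrime(base + i * mult):
--             count += 1
--     return count
-- ===== Notes on version B (the rewrite author's own statement) =====
-- stated objective: alternative
-- what changed: B replaces A's per-candidate string assembly and int() parsing by one arithmetic pre-pass computing base (p's digits at their place values) and mult (sum of place values of '1' positions), then tests isPrime(base + i*mult) for each digit i; isPrime is untouched.
-- outside the precondition, e.g. on checkpb('+5', '01'): A returns 5, B raises ValueError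
import Mathlib
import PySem

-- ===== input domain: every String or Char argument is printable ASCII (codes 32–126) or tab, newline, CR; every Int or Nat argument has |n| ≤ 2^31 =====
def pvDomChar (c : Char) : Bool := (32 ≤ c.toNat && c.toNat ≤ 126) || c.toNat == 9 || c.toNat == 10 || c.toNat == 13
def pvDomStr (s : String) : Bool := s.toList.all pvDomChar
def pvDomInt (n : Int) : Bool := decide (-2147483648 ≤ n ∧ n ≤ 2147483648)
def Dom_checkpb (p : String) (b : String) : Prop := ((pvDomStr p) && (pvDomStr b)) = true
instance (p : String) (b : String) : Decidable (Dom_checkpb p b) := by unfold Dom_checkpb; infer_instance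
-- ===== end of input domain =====

-- B computes each candidate arithmetically (base + i*mult) instead of A's per-candidate
-- string assembly + int() parse; same isPrime, same count (objective: alternative).

-- ===== PORT A =====
-- int(t): exact hand port of Python int() for the strings reached under Pre_ (t is always a
-- nonempty string of ASCII digits there); none = ValueError.
def pyIntDigits? (t : List Char) : Option Int :=
  if t ≠ [] ∧ t.all Char.isDigit then
    some (t.foldl (fun v c => 10 * v + ((c.toNat : Int) - 48)) 0)
  else none

-- isPrime: literal port; Python's int(sqrt(x)) (float sqrt, truncated) is ported as the
-- floor square root Nat.sqrt, which agrees with it wherever the float sqrt is exact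
-- (in particular for all x < 2^52).
def isPrimePy (x : Int) : Bool :=
  if x < 1 then false
  else if PySem.Int.mod x 2 = 0 ∧ x ≠ 2 then false
  else
    (PySem.List.pyRange 3 ((Nat.sqrt x.toNat : Int) + 1) 2).all
      (fun i => ¬ (PySem.Int.mod x i = 0 ∧ x ≠ i))

-- A's inner j-loop ('for j in range(len(b))' building t); m is passed len(b) by checkpb.
def buildT (pl bl : List Char) (i : Int) (m : Int) : List Char :=
  (PySem.List.pyRange 0 m 1).foldl (fun t j =>
    if PySem.List.pyGetD bl j ' ' = '1' then t ++ PySem.Int.toChars i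
    else t ++ [PySem.List.pyGetD pl j ' ']) []

def checkpb (p : String) (b : String) : Int :=
  let pl := p.toList
  let bl := b.toList
  (PySem.List.pyRange 0 10 1).foldl (fun pcount i =>
    if PySem.List.pyGetD bl 0 ' ' = '1' ∧ i = 0 then pcount
    else
      if isPrimePy ((pyIntDigits? (buildT pl bl i (PySem.List.len bl))).getD 0)
      then pcount + 1 else pcount) 0

-- ===== PORT B =====
-- B's pre-pass ('for j in range(L)' accumulating (base, mult)); m is passed len(b).
-- w = 10**(L-1-j): the exponent is nonnegative for every visited j, so .toNat is exact.
def baseMult (pl bl : List Char) (m : Int) : Int × Int :=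
  (PySem.List.pyRange 0 m 1).foldl (fun (bm : Int × Int) j =>
    let w : Int := 10 ^ ((PySem.List.len bl) - 1 - j).toNat
    if PySem.List.pyGetD bl j ' ' = '1' then (bm.1, bm.2 + w)
    else (bm.1 + ((pyIntDigits? [PySem.List.pyGetD pl j ' ']).getD 0) * w, bm.2)) (0, 0)

def checkpb_alt (p : String) (b : String) : Int :=
  let pl := p.toList
  let bl := b.toList
  let bm := baseMult pl bl (PySem.List.len bl)
  (PySem.List.pyRange 0 10 1).foldl (fun count i =>
    if PySem.List.pyGetD bl 0 ' ' = '1' ∧ i = 0 then count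
    else if isPrimePy (bm.1 + i * bm.2) then count + 1 else count) 0

-- ===== PRECONDITION & SPEC =====
-- Pre_ excludes only inputs on which a program raises: empty b (IndexError in A), a
-- non-'1' position of b at which p has no character (IndexError in A) or a non-digit
-- character (int(t) raises ValueError in A for most of them; for the few A still accepts,
-- e.g. a '+' sign, B raises ValueError at int(p[j])).
def Pre_checkpb (p : String) (b : String) : Prop :=
  b.toList ≠ [] ∧
  ∀ j < b.toList.length, b.toList.getD j ' ' ≠ '1' →
    (j < p.toList.length ∧ (p.toList.getD j ' ').isDigit)

instance (p : String) (b : String) : Decidable (Pre_checkpb p b) := by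
  unfold Pre_checkpb; infer_instance

def pvWitness_checkpb : String × String := ("23", "13")

def Spec_checkpb (p : String) (b : String) (out : Int) : Prop := out = checkpb_alt p b
instance (p : String) (b : String) (out : Int) : Decidable (Spec_checkpb p b out) := by unfold Spec_checkpb; infer_instance

-- ===== CLAIM (what is proved, stated in full; the proofs are below) =====
def Claim_equal_checkpb : Prop := ∀ (p : String) (b : String), Dom_checkpb p b → Pre_checkpb p b → Spec_checkpb p b (checkpb p b)

-- ===== LEMMAS AND PROOFS =====

-- decimal value of a digit string, as accumulated left to right
def sval (t : List Char) : Int := t.foldl (fun v c => 10 * v + ((c.toNat : Int) - 48)) 0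

theorem sval_append_singleton (t : List Char) (c : Char) :
    sval (t ++ [c]) = 10 * sval t + ((c.toNat : Int) - 48) := by
  simp [sval]

theorem toChars_digit (i : Int) (h0 : 0 ≤ i) (h9 : i < 10) :
    ∃ c : Char, PySem.Int.toChars i = [c] ∧ c.isDigit = true ∧ (c.toNat : Int) - 48 = i := by
  interval_cases i
  · exact ⟨'0', by decide, by decide, by decide⟩
  · exact ⟨'1', by decide, by decide, by decide⟩
  · exact ⟨'2', by decide, by decide, by decide⟩
  · exact ⟨'3', by decide, by decide, by decide⟩
  · exact ⟨'4', by decide, by decide, by decide⟩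
  · exact ⟨'5', by decide, by decide, by decide⟩
  · exact ⟨'6', by decide, by decide, by decide⟩
  · exact ⟨'7', by decide, by decide, by decide⟩
  · exact ⟨'8', by decide, by decide, by decide⟩
  · exact ⟨'9', by decide, by decide, by decide⟩

theorem pyIntDigits_singleton (c : Char) (h : c.isDigit = true) :
    (pyIntDigits? [c]).getD 0 = (c.toNat : Int) - 48 := by
  simp [pyIntDigits?, h]

-- Loop invariant tying A's partially built string to B's partial (base, mult):
-- after m steps t has m digit characters and base + i*mult = sval t * 10^(L-m).
theorem build_inv (pl bl : List Char) (i : Int) (hi0 : 0 ≤ i) (hi9 : i < 10)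
    (hd : ∀ j < bl.length, bl.getD j ' ' ≠ '1' → (pl.getD j ' ').isDigit)
    (m : Nat) (hm : m ≤ bl.length) :
    (buildT pl bl i m).length = m ∧
    (buildT pl bl i m).all Char.isDigit = true ∧
    (baseMult pl bl m).1 + i * (baseMult pl bl m).2
      = sval (buildT pl bl i m) * 10 ^ (bl.length - m) := by
  induction m with
  | zero => simp [buildT, baseMult, sval, PySem.List.pyRange_one_eq_nil]
  | succ m ih =>
    obtain ⟨ihl, ihd, ihv⟩ := ih (Nat.le_of_succ_le hm)
    have hmlt : m < bl.length := hm
    have hrange : PySem.List.pyRange 0 ((m + 1 : Nat) : Int) 1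
        = PySem.List.pyRange 0 (m : Int) 1 ++ [(m : Int)] := by
      push_cast
      exact PySem.List.pyRange_one_succ_right (by positivity)
    have hget : PySem.List.pyGetD bl ((m : Nat) : Int) ' ' = bl.getD m ' ' :=
      PySem.List.pyGetD_natCast bl m ' '
    have hgetp : PySem.List.pyGetD pl ((m : Nat) : Int) ' ' = pl.getD m ' ' :=
      PySem.List.pyGetD_natCast pl m ' '
    have hT : buildT pl bl i ((m+1 : Nat) : Int)
        = (if bl.getD m ' ' = '1' then buildT pl bl i m ++ PySem.Int.toChars i
           else buildT pl bl i m ++ [pl.getD m ' ']) := by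
      simp only [buildT, hrange, List.foldl_append, List.foldl_cons, List.foldl_nil, hget, hgetp]
    have hw : ((PySem.List.len bl) - 1 - (m : Int)).toNat = bl.length - 1 - m := by
      simp only [PySem.List.len_eq]
      omega
    have hBM : baseMult pl bl ((m+1 : Nat) : Int)
        = (if bl.getD m ' ' = '1' then
             ((baseMult pl bl m).1, (baseMult pl bl m).2 + 10 ^ (bl.length - 1 - m))
           else
             ((baseMult pl bl m).1
               + ((pyIntDigits? [pl.getD m ' ']).getD 0) * 10 ^ (bl.length - 1 - m),
              (baseMult pl bl m).2)) := by
      simp only [baseMult, hrange, List.foldl_append, List.foldl_cons, List.foldl_nil,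
        hget, hgetp, hw]
    have hpow : (10 : Int) ^ (bl.length - 1 - m) = 10 ^ (bl.length - (m+1)) := by
      congr 1; omega
    have hsplit : (10 : Int) ^ (bl.length - m) = 10 ^ (bl.length - (m+1)) * 10 := by
      rw [show bl.length - m = (bl.length - (m+1)) + 1 by omega, pow_succ]
    by_cases h1 : bl.getD m ' ' = '1'
    · obtain ⟨c, hc, hcd, hcv⟩ := toChars_digit i hi0 hi9
      rw [hT, hBM, if_pos h1, if_pos h1, hc]
      refine ⟨by simp [ihl], by simp [List.all_append, ihd, hcd], ?_⟩
      rw [sval_append_singleton, hcv, hpow]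
      rw [hsplit] at ihv
      linear_combination ihv
    · have hdig : (pl.getD m ' ').isDigit = true := hd m hmlt h1
      rw [hT, hBM, if_neg h1, if_neg h1]
      refine ⟨by simp [ihl], ?_, ?_⟩
      · simp only [List.all_append, ihd, Bool.true_and]
        simpa [List.all_cons] using hdig
      · rw [sval_append_singleton, pyIntDigits_singleton _ hdig, hpow]
        rw [hsplit] at ihv
        linear_combination ihv

theorem candidate_eq (pl bl : List Char) (hne : bl ≠ [])
    (hd : ∀ j < bl.length, bl.getD j ' ' ≠ '1' → (pl.getD j ' ').isDigit)
    (i : Int) (hi0 : 0 ≤ i) (hi9 : i < 10) :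
    (pyIntDigits? (buildT pl bl i (PySem.List.len bl))).getD 0
      = (baseMult pl bl (PySem.List.len bl)).1 + i * (baseMult pl bl (PySem.List.len bl)).2 := by
  have hL : PySem.List.len bl = ((bl.length : Nat) : Int) := by simp [PySem.List.len_eq]
  obtain ⟨h1, h2, h3⟩ := build_inv pl bl i hi0 hi9 hd bl.length le_rfl
  rw [hL]
  have hne' : buildT pl bl i ((bl.length : Nat) : Int) ≠ [] := by
    intro h; rw [h] at h1; simp at h1
    exact hne (List.eq_nil_of_length_eq_zero h1.symm)
  rw [pyIntDigits?, if_pos ⟨hne', h2⟩]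
  simp only [Option.getD_some]
  rw [h3]
  simp [sval]

-- ===== VERDICT (by name: the statement is the Claim_ definition above) =====
theorem checkpb_spec : Claim_equal_checkpb := by
  intro p b _hdom hpre
  obtain ⟨hne, hd'⟩ := hpre
  have hd : ∀ j < b.toList.length, b.toList.getD j ' ' ≠ '1' → (p.toList.getD j ' ').isDigit :=
    fun j hj h1 => (hd' j hj h1).2
  unfold Spec_checkpb
  simp only [checkpb, checkpb_alt]
  refine PySem.List.foldl_congr_mem _ _ _ _ ?_
  intro acc i hi
  rw [PySem.List.mem_pyRange_one] at hi
  by_cases hg : PySem.List.pyGetD b.toList 0 ' ' = '1' ∧ i = 0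
  · rw [if_pos hg, if_pos hg]
  · rw [if_neg hg, if_neg hg,
      candidate_eq p.toList b.toList hne hd i hi.1 hi.2]
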